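-- pv_equiv track=rewrite | github.com/TomHaz00/AIT | cba.py | bfs_and_closed
-- ===== SOURCE A (Python) =====
-- def bfs_and_closed(start, target):
--     queue = [start]
--     closed_list = set()
--     closed_list.add(start)
--     steps = 0
--
--     while queue:
--         current = queue.pop(0)
--
--         if current == target:
--             return steps
--
--         for next_num in [current + 1, current - 1]:
--             if next_num not in closed_list:
--                 queue.append(next_num)
--                 closed_list.add(next_num)
--
--         steps += 1
--
--     return -1
-- ===== SOURCE B (Python) =====
-- def bfs_and_closed(start, target):
--     d = target - start
--     if d > 0:
--         return 2 * d - 1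
--     return -2 * d
-- ===== Notes on version B (the rewrite author's own statement) =====
-- stated objective: faster
-- what changed: Replaced the BFS queue/closed-set simulation counting pops with the closed form 2d-1 for d=target-start>0, -2d otherwise (0 when equal).
import Mathlib
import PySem

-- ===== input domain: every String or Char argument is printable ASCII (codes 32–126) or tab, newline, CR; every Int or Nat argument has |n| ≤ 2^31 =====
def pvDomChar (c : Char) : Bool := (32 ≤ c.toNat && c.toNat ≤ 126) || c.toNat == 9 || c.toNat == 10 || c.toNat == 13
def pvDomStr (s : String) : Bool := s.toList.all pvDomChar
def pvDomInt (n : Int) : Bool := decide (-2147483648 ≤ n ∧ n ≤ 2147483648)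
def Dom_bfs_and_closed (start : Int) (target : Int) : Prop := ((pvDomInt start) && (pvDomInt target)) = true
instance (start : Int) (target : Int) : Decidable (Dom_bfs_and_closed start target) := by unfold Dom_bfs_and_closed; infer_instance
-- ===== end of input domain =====

-- B replaces A's BFS simulation over a queue and closed set by the O(1) closed form
-- 2d-1 (d = target-start > 0) / -2d (d ≤ 0); measured asymptotically faster.

-- ===== PORT A =====
-- The while loop, as a fuel recursion; fuel 2*|target-start|+2 is an upper bound on the
-- number of pops (proved sufficient below: the target is always reached before fuel runs out).
-- Python's 'closed_list' is a hash set consulted only by membership; it is modelled by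
-- Std.HashSet Int, which is membership-exact (no set iteration order is ever used).
def bfsLoop (target : Int) : Nat → List Int → Std.HashSet Int → Int → Int
  | 0, _, _, _ => -1
  | _ + 1, [], _, _ => -1                      -- 'while queue:' false → return -1
  | fuel + 1, current :: rest, closed, steps =>
    if current = target then steps
    else
      -- for next_num in [current+1, current-1]: if next_num not in closed_list: append/add
      let s1 := if (current + 1) ∉ closed then
                  (rest ++ [current + 1], closed.insert (current + 1))
                else (rest, closed)
      let s2 := if (current - 1) ∉ s1.2 then
                  (s1.1 ++ [current - 1], s1.2.insert (current - 1))
                else (s1.1, s1.2)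
      bfsLoop target fuel s2.1 s2.2 (steps + 1)

def bfs_and_closed (start : Int) (target : Int) : Int :=
  bfsLoop target (2 * (target - start).natAbs + 2) [start]
    (Std.HashSet.emptyWithCapacity.insert start) 0

-- ===== PORT B =====
def bfs_and_closed_alt (start : Int) (target : Int) : Int :=
  let d := target - start
  if d > 0 then 2 * d - 1 else -2 * d

-- ===== PRECONDITION & SPEC =====
def Spec_bfs_and_closed (start : Int) (target : Int) (out : Int) : Prop := out = bfs_and_closed_alt start target
instance (start : Int) (target : Int) (out : Int) : Decidable (Spec_bfs_and_closed start target out) := by unfold Spec_bfs_and_closed; infer_instance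

-- ===== CLAIM (what is proved, stated in full; the proofs are below) =====
def Claim_equal_bfs_and_closed : Prop := ∀ (start : Int) (target : Int), Dom_bfs_and_closed start target → Spec_bfs_and_closed start target (bfs_and_closed start target)

-- ===== LEMMAS AND PROOFS =====

lemma alt_eq (start target : Int) :
    bfs_and_closed_alt start target =
      if target - start > 0 then 2 * (target - start) - 1 else -2 * (target - start) := rfl

-- Invariant: after an odd number 2j-1 of pops the queue is [start+j, start-j] and the
-- closed set holds exactly the interval [start-j, start+j]; k pairs of pops remain.
lemma bfsLoop_invariant (start target : Int) :
    ∀ (k j : Nat) (c : Std.HashSet Int) (f : Nat),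
      1 ≤ j → ((j : Int) + (k : Int) = ((target - start).natAbs : Int)) →
      (∀ x : Int, x ∈ c ↔ start - (j : Int) ≤ x ∧ x ≤ start + (j : Int)) →
      2 * k + 2 ≤ f →
      bfsLoop target f [start + (j : Int), start - (j : Int)] c (2 * (j : Int) - 1) =
        bfs_and_closed_alt start target := by
  intro k
  induction k with
  | zero =>
    intro j c f hj habs hc hf
    rcases f with _ | _ | f
    · omega
    · omega
    · -- j = |target - start|, so target = start + j or target = start - j
      have hd : target = start + (j : Int) ∨ target = start - (j : Int) := by
        rcases Int.natAbs_eq (target - start) with h | h <;> [left; right] <;> omega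
      rcases hd with h | h
      · -- first pop is the target: steps = 2j-1 = 2(target-start)-1
        simp only [bfsLoop, if_pos h.symm, alt_eq]
        rw [if_pos (by omega)]
        omega
      · -- pop start+j (≠ target), then pop start-j = target with steps = 2j
        have hne : start + (j : Int) ≠ target := by omega
        have h1 : (start + (j : Int) + 1) ∉ c := by
          intro hm; have := (hc _).mp hm; omega
        have h2 : (start + (j : Int) - 1) ∈ c.insert (start + (j : Int) + 1) := by
          rw [Std.HashSet.mem_insert]; right; exact (hc _).mpr (by omega)
        simp only [bfsLoop, List.cons_append, List.nil_append,
          if_neg hne, if_pos h1, if_neg (not_not_intro h2)]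
        rw [if_pos (show start - (j : Int) = target by omega)]
        rw [alt_eq, if_neg (by omega)]
        omega
  | succ k ih =>
    intro j c f hj habs hc hf
    rcases f with _ | _ | f
    · omega
    · omega
    · have hne : start + (j : Int) ≠ target := by
        intro h; rcases Int.natAbs_eq (target - start) with h' | h' <;> omega
      have hne2 : start - (j : Int) ≠ target := by
        intro h; rcases Int.natAbs_eq (target - start) with h' | h' <;> omega
      have h1 : (start + (j : Int) + 1) ∉ c := by
        intro hm; have := (hc _).mp hm; omega
      have h2 : (start + (j : Int) - 1) ∈ c.insert (start + (j : Int) + 1) := by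
        rw [Std.HashSet.mem_insert]; right; exact (hc _).mpr (by omega)
      have h3 : (start - (j : Int) + 1) ∈ c.insert (start + (j : Int) + 1) := by
        rw [Std.HashSet.mem_insert]; right; exact (hc _).mpr (by omega)
      have h4 : (start - (j : Int) - 1) ∉ c.insert (start + (j : Int) + 1) := by
        rw [Std.HashSet.mem_insert]
        rintro (h | hm)
        · simp at h; omega
        · have := (hc _).mp hm; omega
      simp only [bfsLoop, List.cons_append, List.nil_append,
        if_neg hne, if_pos h1, if_neg (not_not_intro h2), if_neg hne2,
        if_neg (not_not_intro h3), if_pos h4]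
      rw [show start + (j : Int) + 1 = start + ((j + 1 : Nat) : Int) by push_cast; ring,
        show start - (j : Int) - 1 = start - ((j + 1 : Nat) : Int) by push_cast; ring,
        show 2 * (j : Int) - 1 + 1 + 1 = 2 * ((j + 1 : Nat) : Int) - 1 by push_cast; ring]
      apply ih (j + 1) _ _ (by omega) (by omega) _ (by omega)
      intro x
      rw [Std.HashSet.mem_insert, Std.HashSet.mem_insert, hc]
      simp only [beq_iff_eq]
      push_cast
      omega

theorem bfs_and_closed_eq (start target : Int) :
    bfs_and_closed start target = bfs_and_closed_alt start target := by
  by_cases h0 : target = start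
  · subst h0
    simp [bfs_and_closed, bfsLoop, alt_eq]
  · unfold bfs_and_closed
    have hd : 1 ≤ (target - start).natAbs := by
      rcases Int.natAbs_eq (target - start) with h | h <;> omega
    obtain ⟨d, hd'⟩ : ∃ d, (target - start).natAbs = d + 1 := ⟨(target - start).natAbs - 1, by omega⟩
    rw [hd', show 2 * (d + 1) + 2 = (2 * d + 3) + 1 by ring]
    have hs : start ≠ target := fun h => h0 h.symm
    have m1 : (start + 1) ∉ (Std.HashSet.emptyWithCapacity : Std.HashSet Int).insert start := by
      simp only [Std.HashSet.mem_insert, Std.HashSet.not_mem_emptyWithCapacity, beq_iff_eq,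
        or_false]
      omega
    have m2 : (start - 1) ∉
        ((Std.HashSet.emptyWithCapacity : Std.HashSet Int).insert start).insert (start + 1) := by
      simp only [Std.HashSet.mem_insert, Std.HashSet.not_mem_emptyWithCapacity, beq_iff_eq,
        or_false]
      omega
    simp only [bfsLoop, List.cons_append, List.nil_append, if_neg hs, if_pos m1, if_pos m2]
    have hinv := bfsLoop_invariant start target d 1
      ((((Std.HashSet.emptyWithCapacity : Std.HashSet Int).insert start).insert
          (start + 1)).insert (start - 1))
      (2 * d + 3) (le_refl 1) (by omega)
      (by
        intro x
        rw [Std.HashSet.mem_insert, Std.HashSet.mem_insert, Std.HashSet.mem_insert]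
        simp only [beq_iff_eq, Std.HashSet.not_mem_emptyWithCapacity, or_false]
        omega)
      (by omega)
    simp only [Nat.cast_one] at hinv
    rw [show (2 : Int) * 1 - 1 = 0 + 1 by ring] at hinv
    exact hinv

-- ===== VERDICT (by name: the statement is the Claim_ definition above) =====
theorem bfs_and_closed_spec : Claim_equal_bfs_and_closed := by
  intro start target _
  exact bfs_and_closed_eq start target
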